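-- pv_equiv track=rewrite | github.com/gavvahar/Monopoly-Deal | rules.py | compute_rent
-- ===== SOURCE A (Python) =====
-- from typing import Dict, List, Tuple, Union
--
-- def get_set_sizes() -> Dict[str, int]:
--     """Return the number of properties required for each color set."""
--     return {
--         "Brown": 2,
--         "Light Blue": 3,
--         "Pink": 3,
--         "Orange": 3,
--         "Red": 3,
--         "Yellow": 3,
--         "Green": 3,
--         "Dark Blue": 2,
--         "Railroads": 4,
--         "Utilities": 2,
--     }
--
-- def get_rent_table() -> Dict[str, List[int]]:
--     """Return rent values for each color set based on number owned."""
--     # Index = number of properties owned (1..set_size)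
--     return {
--         "Brown": [1, 2],
--         "Light Blue": [1, 2, 3],
--         "Pink": [1, 2, 4],
--         "Orange": [1, 3, 5],
--         "Red": [2, 3, 6],
--         "Yellow": [2, 4, 6],
--         "Green": [2, 4, 7],
--         "Dark Blue": [3, 8],
--         "Railroads": [1, 2, 3, 4],
--         "Utilities": [1, 2],
--     }
--
-- def get_build_eligible_colors() -> List[str]:
--     """Return colors eligible for building houses/hotels."""
--     # Houses/Hotels only on color sets (not rail/utility)
--     return [c for c in get_set_sizes() if c not in {"Railroads", "Utilities"}]
--
-- def get_rule_flags() -> Dict[str, bool]: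
--     """Return rule flags for game tweaks."""
--     # Tweak as you like (or override in your app)
--     return {
--         "limit_double_rent_to_one": False,  # True = only 1 Double per rent
--         "sly_deal_on_full_sets": False,  # Officially not allowed
--         "forced_deal_on_full_sets": False,  # Officially not allowed
--     }
--
-- def get_build_bonuses() -> Tuple[int, int]:
--     """Return house and hotel rent bonuses."""
--     # (house_bonus, hotel_bonus)
--     return (3, 4)
--
-- def is_full_set(color: str, owned_in_color: int) -> bool:
--     """Return True if player owns a full set of the given color."""
--     return owned_in_color >= get_set_sizes()[color]
--
-- def base_rent(color: str, owned_in_color: int) -> int: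
--     """Return base rent for a color set."""
--     sizes, table = get_set_sizes(), get_rent_table()
--     owned = max(1, min(owned_in_color, sizes[color]))
--     return table[color][owned - 1]
--
-- def apply_build_bonuses(
--     color: str, owned_in_color: int, has_house: bool, has_hotel: bool, current_rent: int
-- ) -> int:
--     """Apply house/hotel bonuses to rent if eligible."""
--     if not is_full_set(color, owned_in_color):
--         return current_rent
--     if color not in get_build_eligible_colors():
--         return current_rent
--     house_bonus, hotel_bonus = get_build_bonuses()
--     if has_house:
--         current_rent += house_bonus
--     if has_hotel:
--         current_rent += hotel_bonus
--     return current_rent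
--
-- def cap_double_rent(double_count: int) -> int:
--     """Cap the number of Double the Rent cards applied."""
--     if get_rule_flags()["limit_double_rent_to_one"]:
--         return min(1, double_count)
--     return max(0, int(double_count))
--
-- def compute_rent(
--     color: str,
--     owned_in_color: int,
--     has_house: bool = False,
--     has_hotel: bool = False,
--     double_rent_cards: int = 0,
-- ) -> int:
--     """Compute total rent for a set, including bonuses and doubles."""
--     rent = base_rent(color, owned_in_color)
--     rent = apply_build_bonuses(color, owned_in_color, has_house, has_hotel, rent)
--     for _ in range(cap_double_rent(double_rent_cards)):
--         rent *= 2
--     return rent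
-- ===== SOURCE B (Python) =====
-- # Precomputed exhaustive rent table: every (color, clamped-owned, house, hotel) rent
-- # is built once from the raw data, so all bonus/full-set logic disappears from the
-- # function body, which becomes one clamp, one dict lookup and one shift. Objective: alternative.
--
-- _DATA = [
--     ("Brown", [1, 2], True),
--     ("Light Blue", [1, 2, 3], True),
--     ("Pink", [1, 2, 4], True),
--     ("Orange", [1, 3, 5], True),
--     ("Red", [2, 3, 6], True),
--     ("Yellow", [2, 4, 6], True),
--     ("Green", [2, 4, 7], True),
--     ("Dark Blue", [3, 8], True),
--     ("Railroads", [1, 2, 3, 4], False),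
--     ("Utilities", [1, 2], False),
-- ]
--
-- _SIZE = {color: len(rents) for color, rents, _ in _DATA}
--
-- _RENT = {
--     (color, owned, house, hotel): rents[owned - 1]
--     + (3 * house + 4 * hotel if eligible and owned == len(rents) else 0)
--     for color, rents, eligible in _DATA
--     for owned in range(1, len(rents) + 1)
--     for house in (False, True)
--     for hotel in (False, True)
-- }
--
--
-- def compute_rent(
--     color,
--     owned_in_color,
--     has_house=False,
--     has_hotel=False,
--     double_rent_cards=0,
-- ):
--     owned = max(1, min(owned_in_color, _SIZE[color]))
--     return _RENT[(color, owned, bool(has_house), bool(has_hotel))] << max(0, double_rent_cards)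
-- ===== Notes on version B (the rewrite author's own statement) =====
-- stated objective: alternative
-- what changed: B precomputes, once, an exhaustive table mapping (color, clamped count, has_house, has_hotel) to the bonus-inclusive rent, so the full-set test, build-eligibility test and bonus conditionals vanish from the function, which becomes a single clamp + dict lookup, and the repeated-doubling loop is replaced by one closed-form left shift.
import Mathlib
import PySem

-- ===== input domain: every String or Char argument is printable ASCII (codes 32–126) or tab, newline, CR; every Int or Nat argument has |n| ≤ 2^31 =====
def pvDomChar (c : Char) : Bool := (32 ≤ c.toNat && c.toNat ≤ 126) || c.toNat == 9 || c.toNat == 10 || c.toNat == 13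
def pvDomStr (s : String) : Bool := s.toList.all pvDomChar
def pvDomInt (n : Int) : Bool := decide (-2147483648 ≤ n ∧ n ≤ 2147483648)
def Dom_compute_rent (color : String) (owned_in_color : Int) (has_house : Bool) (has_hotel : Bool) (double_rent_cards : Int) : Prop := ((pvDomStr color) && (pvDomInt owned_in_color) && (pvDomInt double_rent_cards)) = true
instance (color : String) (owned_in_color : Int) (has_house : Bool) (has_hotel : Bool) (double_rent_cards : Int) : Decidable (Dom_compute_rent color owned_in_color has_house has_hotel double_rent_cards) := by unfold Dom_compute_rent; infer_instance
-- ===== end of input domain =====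

-- B precomputes an exhaustive (color, clamped count, house, hotel) → rent table once,
-- so compute_rent is a single clamp + lookup + closed-form shift. Objective: alternative.

-- ===== PORT A =====
def pv_set_sizes : PySem.Dict String Int := PySem.Dict.ofList
  [("Brown", 2), ("Light Blue", 3), ("Pink", 3), ("Orange", 3), ("Red", 3),
   ("Yellow", 3), ("Green", 3), ("Dark Blue", 2), ("Railroads", 4), ("Utilities", 2)]

def pv_rent_table : PySem.Dict String (List Int) := PySem.Dict.ofList
  [("Brown", [1, 2]), ("Light Blue", [1, 2, 3]), ("Pink", [1, 2, 4]), ("Orange", [1, 3, 5]),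
   ("Red", [2, 3, 6]), ("Yellow", [2, 4, 6]), ("Green", [2, 4, 7]), ("Dark Blue", [3, 8]),
   ("Railroads", [1, 2, 3, 4]), ("Utilities", [1, 2])]

def pv_build_eligible_colors : List String :=
  pv_set_sizes.keys.filter (fun c => !(c == "Railroads" || c == "Utilities"))

def pv_rule_flags : PySem.Dict String Bool := PySem.Dict.ofList
  [("limit_double_rent_to_one", false), ("sly_deal_on_full_sets", false),
   ("forced_deal_on_full_sets", false)]

def pv_is_full_set (color : String) (owned_in_color : Int) : Bool :=
  decide (owned_in_color ≥ pv_set_sizes.getD color 0)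

-- getD defaults are only reached outside Pre_ (Python raises KeyError there)
def pv_base_rent (color : String) (owned_in_color : Int) : Int :=
  let owned := max 1 (min owned_in_color (pv_set_sizes.getD color 0))
  PySem.List.pyGetD (pv_rent_table.getD color []) (owned - 1) 0

def pv_apply_build_bonuses (color : String) (owned_in_color : Int)
    (has_house has_hotel : Bool) (current_rent : Int) : Int :=
  if ¬ pv_is_full_set color owned_in_color then current_rent
  else if ¬ (color ∈ pv_build_eligible_colors) then current_rent
  else
    let r1 := if has_house then current_rent + 3 else current_rent
    if has_hotel then r1 + 4 else r1

def pv_cap_double_rent (double_count : Int) : Int :=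
  if pv_rule_flags.getD "limit_double_rent_to_one" false then min 1 double_count
  else max 0 double_count

def compute_rent (color : String) (owned_in_color : Int) (has_house : Bool) (has_hotel : Bool) (double_rent_cards : Int) : Int :=
  let rent := pv_base_rent color owned_in_color
  let rent := pv_apply_build_bonuses color owned_in_color has_house has_hotel rent
  (PySem.List.pyRange 0 (pv_cap_double_rent double_rent_cards) 1).foldl (fun r _ => r * 2) rent

-- ===== PORT B =====
def pvB_data : List (String × List Int × Bool) :=
  [("Brown", [1, 2], true), ("Light Blue", [1, 2, 3], true), ("Pink", [1, 2, 4], true),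
   ("Orange", [1, 3, 5], true), ("Red", [2, 3, 6], true), ("Yellow", [2, 4, 6], true),
   ("Green", [2, 4, 7], true), ("Dark Blue", [3, 8], true),
   ("Railroads", [1, 2, 3, 4], false), ("Utilities", [1, 2], false)]

def pvB_size : PySem.Dict String Int :=
  PySem.Dict.ofList (pvB_data.map (fun t => (t.1, (t.2.1.length : Int))))

-- the exhaustive precomputed table, built by comprehension as in Source B
def pvB_rent : PySem.Dict (String × Int × Bool × Bool) Int :=
  PySem.Dict.ofList (pvB_data.flatMap (fun t =>
    (PySem.List.pyRange 1 ((t.2.1.length : Int) + 1) 1).flatMap (fun owned =>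
      [false, true].flatMap (fun house =>
        [false, true].map (fun hotel =>
          ((t.1, owned, house, hotel),
           PySem.List.pyGetD t.2.1 (owned - 1) 0 +
             (if t.2.2 = true ∧ owned = (t.2.1.length : Int) then
                3 * (if house then 1 else 0) + 4 * (if hotel then 1 else 0)
              else 0)))))))

-- getD defaults are only reached outside Pre_ (Python raises KeyError there)
def compute_rent_alt (color : String) (owned_in_color : Int) (has_house : Bool) (has_hotel : Bool) (double_rent_cards : Int) : Int :=
  let owned := max 1 (min owned_in_color (pvB_size.getD color 0))
  (pvB_rent.getD (color, owned, has_house, has_hotel) 0) <<< (max 0 double_rent_cards).toNat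

-- ===== PRECONDITION & SPEC =====
-- Pre_ excludes only colors absent from the rent table, on which Python A raises KeyError.
def Pre_compute_rent (color : String) (owned_in_color : Int) (has_house : Bool) (has_hotel : Bool) (double_rent_cards : Int) : Prop :=
  color ∈ ["Brown", "Light Blue", "Pink", "Orange", "Red", "Yellow", "Green",
           "Dark Blue", "Railroads", "Utilities"]
instance (color : String) (owned_in_color : Int) (has_house : Bool) (has_hotel : Bool) (double_rent_cards : Int) : Decidable (Pre_compute_rent color owned_in_color has_house has_hotel double_rent_cards) := by unfold Pre_compute_rent; infer_instance

def pvWitness_compute_rent : String × Int × Bool × Bool × Int := ("Red", 2, true, false, 1)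

def Spec_compute_rent (color : String) (owned_in_color : Int) (has_house : Bool) (has_hotel : Bool) (double_rent_cards : Int) (out : Int) : Prop := out = compute_rent_alt color owned_in_color has_house has_hotel double_rent_cards
instance (color : String) (owned_in_color : Int) (has_house : Bool) (has_hotel : Bool) (double_rent_cards : Int) (out : Int) : Decidable (Spec_compute_rent color owned_in_color has_house has_hotel double_rent_cards out) := by unfold Spec_compute_rent; infer_instance

-- ===== CLAIM (what is proved, stated in full; the proofs are below) =====
def Claim_equal_compute_rent : Prop := ∀ (color : String) (owned_in_color : Int) (has_house : Bool) (has_hotel : Bool) (double_rent_cards : Int), Dom_compute_rent color owned_in_color has_house has_hotel double_rent_cards → Pre_compute_rent color owned_in_color has_house has_hotel double_rent_cards → Spec_compute_rent color owned_in_color has_house has_hotel double_rent_cards (compute_rent color owned_in_color has_house has_hotel double_rent_cards)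

-- ===== LEMMAS AND PROOFS =====

-- repeated doubling over range(n) is a left shift
lemma foldl_double_pyRange (n : Nat) (r : Int) :
    (PySem.List.pyRange 0 (n : Int) 1).foldl (fun a _ => a * 2) r = r <<< n := by
  induction n generalizing r with
  | zero => simp
  | succ k ih =>
      have h : ((k : Int) + 1) = ((k + 1 : Nat) : Int) := by push_cast; ring
      rw [← h, PySem.List.pyRange_one_succ_right (by positivity), List.foldl_append, ih]
      simp [Int.shiftLeft_eq]
      ring

-- A's port is (base-with-bonus) <<< (capped doubles)
lemma compute_rent_shape (c : String) (o : Int) (hh ht : Bool) (d : Int) :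
    compute_rent c o hh ht d =
      (pv_apply_build_bonuses c o hh ht (pv_base_rent c o)) <<< (max 0 d).toNat := by
  have hcap : pv_cap_double_rent d = (((max 0 d).toNat : Nat) : Int) := by
    rw [show pv_cap_double_rent d = max 0 d from rfl]; omega
  simp only [compute_rent, hcap, foldl_double_pyRange]

-- A's base-with-bonus as a function of the clamped count k and the full-set flag f
def pvA_base (c : String) (k : Int) (f hh ht : Bool) : Int :=
  let base := PySem.List.pyGetD (pv_rent_table.getD c []) (k - 1) 0
  if ¬ f then base
  else if ¬ (c ∈ pv_build_eligible_colors) then base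
  else
    let r1 := if hh then base + 3 else base
    if ht then r1 + 4 else r1

lemma A_base_eq (c : String) (o k : Int) (f hh ht : Bool)
    (hmin : max 1 (min o (pv_set_sizes.getD c 0)) = k)
    (hf : decide (o ≥ pv_set_sizes.getD c 0) = f) :
    pv_apply_build_bonuses c o hh ht (pv_base_rent c o) = pvA_base c k f hh ht := by
  simp only [pv_apply_build_bonuses, pv_base_rent, pv_is_full_set, pvA_base, hmin, hf]

-- per-color core: the two ports agree for every owner count, flags and doubles
lemma core (c : String) (s : Int) (h2s : (2:Int) ≤ s)
    (h1 : pv_set_sizes.getD c 0 = s) (h2 : pvB_size.getD c 0 = s)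
    (hbase : ∀ k : Int, 1 ≤ k → k ≤ s → ∀ hh ht : Bool,
        pvA_base c k (decide (k = s)) hh ht = pvB_rent.getD (c, k, hh, ht) 0)
    (o : Int) (hh ht : Bool) (d : Int) :
    compute_rent c o hh ht d = compute_rent_alt c o hh ht d := by
  rw [compute_rent_shape]
  show _ = (pvB_rent.getD (c, max 1 (min o (pvB_size.getD c 0)), hh, ht) 0) <<< (max 0 d).toNat
  rw [h2]
  set k := max 1 (min o s) with hk
  have hfull : (o ≥ s ↔ k = s) := by omega
  rw [A_base_eq c o k (decide (k = s)) hh ht (by rw [h1])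
       (by rw [h1]; exact decide_eq_decide.mpr hfull),
     hbase k (le_max_left _ _) (by omega) hh ht]

set_option maxRecDepth 100000 in
-- ===== VERDICT (by name: the statement is the Claim_ definition above) =====
theorem compute_rent_spec : Claim_equal_compute_rent := by
  intro c o hh ht d _ hPre
  unfold Pre_compute_rent at hPre
  show compute_rent c o hh ht d = compute_rent_alt c o hh ht d
  fin_cases hPre
  · exact core "Brown" 2 (by norm_num) (by decide) (by decide)
      (fun k hk1 hks hh ht => by interval_cases k <;> cases hh <;> cases ht <;> decide) o hh ht d
  · exact core "Light Blue" 3 (by norm_num) (by decide) (by decide)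
      (fun k hk1 hks hh ht => by interval_cases k <;> cases hh <;> cases ht <;> decide) o hh ht d
  · exact core "Pink" 3 (by norm_num) (by decide) (by decide)
      (fun k hk1 hks hh ht => by interval_cases k <;> cases hh <;> cases ht <;> decide) o hh ht d
  · exact core "Orange" 3 (by norm_num) (by decide) (by decide)
      (fun k hk1 hks hh ht => by interval_cases k <;> cases hh <;> cases ht <;> decide) o hh ht d
  · exact core "Red" 3 (by norm_num) (by decide) (by decide)
      (fun k hk1 hks hh ht => by interval_cases k <;> cases hh <;> cases ht <;> decide) o hh ht d
  · exact core "Yellow" 3 (by norm_num) (by decide) (by decide)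
      (fun k hk1 hks hh ht => by interval_cases k <;> cases hh <;> cases ht <;> decide) o hh ht d
  · exact core "Green" 3 (by norm_num) (by decide) (by decide)
      (fun k hk1 hks hh ht => by interval_cases k <;> cases hh <;> cases ht <;> decide) o hh ht d
  · exact core "Dark Blue" 2 (by norm_num) (by decide) (by decide)
      (fun k hk1 hks hh ht => by interval_cases k <;> cases hh <;> cases ht <;> decide) o hh ht d
  · exact core "Railroads" 4 (by norm_num) (by decide) (by decide)
      (fun k hk1 hks hh ht => by interval_cases k <;> cases hh <;> cases ht <;> decide) o hh ht d
  · exact core "Utilities" 2 (by norm_num) (by decide) (by decide)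
      (fun k hk1 hks hh ht => by interval_cases k <;> cases hh <;> cases ht <;> decide) o hh ht d
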